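-- pv_equiv track=rewrite | github.com/thisAbdU/A2SV-contest-Exercises | C_Arrow_Path.py | can_reach_destination
-- ===== SOURCE A (Python) =====
-- def can_reach_destination(n, rows):
--     # Initialize lists to check diagonal patterns
--     ok1 = [False] * (n // 2)
--     ok2 = [False] * (n // 2)
--
--
--     for i in range(2):
--         s = rows[i]
--         for j in range(n):
--             if (i + j) % 2 == 1:
--                 if s[j] == '<':
--                     ok1[(i + j) // 2] = True
--             if (j - i + 1) % 2 == 0:
--                 if s[j] == '<':
--                     ok2[(j - i + 1) // 2] = True
--
--     for i in range(n // 2):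
--         if ok1[i] and ok2[i]:
--             return "NO"
--
--     return "YES"
-- ===== SOURCE B (Python) =====
-- def can_reach_destination(n, rows):
--     r0, r1 = rows[0], rows[1]
--     for k in range(n // 2):
--         ok1 = r0[2 * k + 1] == '<' or r1[2 * k] == '<'
--         ok2 = (2 * k - 1 >= 0 and r0[2 * k - 1] == '<') or r1[2 * k] == '<'
--         if ok1 and ok2:
--             return "NO"
--     return "YES"
-- ===== Notes on version B (the rewrite author's own statement) =====
-- stated objective: simpler
-- what changed: B drops A's two boolean arrays and the (i+j)/(j-i+1) parity machinery: a single loop over diagonals k computes the two per-diagonal flags directly from index lookups (rows[0][2k+1]/rows[1][2k] and rows[0][2k-1]/rows[1][2k]) and returns 'NO' as soon as both hold.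
import Mathlib
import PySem

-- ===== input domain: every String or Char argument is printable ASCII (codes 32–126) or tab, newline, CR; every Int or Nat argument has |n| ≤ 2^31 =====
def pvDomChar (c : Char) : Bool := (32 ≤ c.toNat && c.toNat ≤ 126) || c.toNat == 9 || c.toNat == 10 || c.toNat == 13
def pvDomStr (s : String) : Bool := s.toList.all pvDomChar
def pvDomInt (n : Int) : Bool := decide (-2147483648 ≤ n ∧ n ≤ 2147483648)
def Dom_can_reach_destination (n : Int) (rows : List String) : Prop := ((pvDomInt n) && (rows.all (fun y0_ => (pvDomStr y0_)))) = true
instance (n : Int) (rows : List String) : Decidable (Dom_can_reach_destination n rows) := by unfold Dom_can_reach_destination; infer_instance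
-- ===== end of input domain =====

-- B replaces A's two filled boolean arrays and the parity arithmetic by one direct pass
-- over the diagonals with an early exit (objective: simpler). Equality of the RETURN value
-- is claimed on Pre_ (the inputs where the Python A returns instead of raising IndexError).

-- s[j] as a Char, with a default never used under Pre_ (A raises on a missing index there)
def pvCharD (s : String) (i : Int) : Char := (PySem.Str.pyGet? s i).getD ' '

-- ===== PORT A =====
def pvStepA (s : String) (i : Int) (st : List Bool × List Bool) (j : Int) : List Bool × List Bool :=
  let ok1 := if PySem.Int.mod (i + j) 2 = 1 then
               (if pvCharD s j = '<' then PySem.List.pySetD st.1 (PySem.Int.floordiv (i + j) 2) true else st.1)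
             else st.1
  let ok2 := if PySem.Int.mod (j - i + 1) 2 = 0 then
               (if pvCharD s j = '<' then PySem.List.pySetD st.2 (PySem.Int.floordiv (j - i + 1) 2) true else st.2)
             else st.2
  (ok1, ok2)

def can_reach_destination (n : Int) (rows : List String) : String :=
  let half := PySem.Int.floordiv n 2
  let init : List Bool × List Bool := (List.replicate half.toNat false, List.replicate half.toNat false)
  let st := (PySem.List.pyRange 0 2 1).foldl (fun st i =>
      let s := PySem.List.pyGetD rows i ""
      (PySem.List.pyRange 0 n 1).foldl (pvStepA s i) st) init
  if (PySem.List.pyRange 0 half 1).any (fun k => PySem.List.pyGetD st.1 k false && PySem.List.pyGetD st.2 k false)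
  then "NO" else "YES"

-- ===== PORT B =====
def pvScanB (r0 r1 : String) : List Int → String
  | [] => "YES"
  | k :: ks =>
      let ok1 := decide (pvCharD r0 (2*k+1) = '<') || decide (pvCharD r1 (2*k) = '<')
      let ok2 := (decide (0 ≤ 2*k-1) && decide (pvCharD r0 (2*k-1) = '<')) || decide (pvCharD r1 (2*k) = '<')
      if ok1 && ok2 then "NO" else pvScanB r0 r1 ks

def can_reach_destination_alt (n : Int) (rows : List String) : String :=
  let r0 := PySem.List.pyGetD rows 0 ""
  let r1 := PySem.List.pyGetD rows 1 ""
  pvScanB r0 r1 (PySem.List.pyRange 0 (PySem.Int.floordiv n 2) 1)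

-- ===== PRECONDITION & SPEC =====
-- Pre_ is exactly the set of inputs on which Python A returns: rows[0] and rows[1] must exist,
-- be long enough for every index A reads, and the two out-of-range array writes A performs
-- when the boundary cell is '<' (IndexError) are excluded.
def Pre_can_reach_destination (n : Int) (rows : List String) : Prop :=
  2 ≤ rows.length ∧
  (2 ≤ n → 2 * PySem.Int.floordiv n 2 ≤ PySem.Str.len (rows.getD 0 "") ∧
           PySem.Str.pyGet? (rows.getD 0 "") (2 * PySem.Int.floordiv n 2 - 1) ≠ some '<') ∧
  (1 ≤ n → 2 * PySem.Int.floordiv (n-1) 2 + 1 ≤ PySem.Str.len (rows.getD 1 "") ∧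
           (PySem.Int.mod n 2 = 1 → PySem.Str.pyGet? (rows.getD 1 "") (n-1) ≠ some '<'))
instance (n : Int) (rows : List String) : Decidable (Pre_can_reach_destination n rows) := by
  unfold Pre_can_reach_destination; infer_instance

def pvWitness_can_reach_destination : Int × List String := (2, ["..", ".."])

def Spec_can_reach_destination (n : Int) (rows : List String) (out : String) : Prop := out = can_reach_destination_alt n rows
instance (n : Int) (rows : List String) (out : String) : Decidable (Spec_can_reach_destination n rows out) := by unfold Spec_can_reach_destination; infer_instance

-- ===== CLAIM (what is proved, stated in full; the proofs are below) =====
def Claim_equal_can_reach_destination : Prop := ∀ (n : Int) (rows : List String), Dom_can_reach_destination n rows → Pre_can_reach_destination n rows → Spec_can_reach_destination n rows (can_reach_destination n rows)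


-- ===== LEMMAS AND PROOFS =====

-- the fold over one row, indexed by naturals
def pvPassA (s : String) (i : Int) (m : Nat) (st : List Bool × List Bool) : List Bool × List Bool :=
  (List.range m).foldl (fun st (t : Nat) => pvStepA s i st (t : Int)) st

theorem pvPassA_succ (s : String) (i : Int) (m : Nat) (st : List Bool × List Bool) :
    pvPassA s i (m+1) st = pvStepA s i (pvPassA s i m st) (m : Int) := by
  simp [pvPassA, List.range_succ]

theorem pv_setD_cast (l : List Bool) (i : Int) (k : Nat) (v : Bool) (h : i = (k : Int)) :
    PySem.List.pySetD l i v = l.set k v := by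
  rw [h, PySem.List.pySetD_natCast]

theorem pvStep0_eq (s : String) (st : List Bool × List Bool) (t : Nat) :
    pvStepA s 0 st (t : Int) =
      ((if t % 2 = 1 ∧ pvCharD s (t : Int) = '<' then st.1.set (t/2) true else st.1),
       (if t % 2 = 1 ∧ pvCharD s (t : Int) = '<' then st.2.set ((t+1)/2) true else st.2)) := by
  by_cases hm : t % 2 = 1
  · have h1 : ((t:Int)) % 2 = 1 := by omega
    have h2 : (2:Int) ∣ (t:Int) + 1 := by omega
    by_cases hc : pvCharD s (t:Int) = '<'
    · simp [pvStepA, h1, h2, hm, hc]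
      constructor
      · exact pv_setD_cast _ _ _ _ (by omega)
      · exact pv_setD_cast _ _ _ _ (by omega)
    · simp [pvStepA, h1, h2, hm, hc]
  · have h1 : ¬(((t:Int)) % 2 = 1) := by omega
    have h2 : ¬((2:Int) ∣ (t:Int) + 1) := by omega
    simp [pvStepA, h1, h2, hm]

theorem pvStep1_eq (s : String) (st : List Bool × List Bool) (t : Nat) :
    pvStepA s 1 st (t : Int) =
      ((if t % 2 = 0 ∧ pvCharD s (t : Int) = '<' then st.1.set (t/2) true else st.1),
       (if t % 2 = 0 ∧ pvCharD s (t : Int) = '<' then st.2.set (t/2) true else st.2)) := by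
  by_cases hm : t % 2 = 0
  · have h1 : ((1:Int)+(t:Int)) % 2 = 1 := by omega
    have h2 : (2:Int) ∣ (t:Int) := by omega
    by_cases hc : pvCharD s (t:Int) = '<'
    · simp [pvStepA, h1, h2, hm, hc]
      constructor
      · exact pv_setD_cast _ _ _ _ (by omega)
      · exact pv_setD_cast _ _ _ _ (by omega)
    · simp [pvStepA, h1, h2, hm, hc]
  · have h1 : ¬(((1:Int)+(t:Int)) % 2 = 1) := by omega
    have h2 : ¬((2:Int) ∣ (t:Int)) := by omega
    simp [pvStepA, h1, h2, hm]
theorem pv_getD_set (l : List Bool) (i k : Nat) (v : Bool) :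
    (l.set i v).getD k false = if i = k ∧ k < l.length then v else l.getD k false := by
  simp [List.getD, List.getElem?_set]
  split_ifs with h1 h2 h3 h4 <;> simp_all

theorem pvPass0 (s : String) (m : Nat) (st : List Bool × List Bool) (k : Nat)
    (hka : k < st.1.length) (hkb : k < st.2.length) :
    (pvPassA s 0 m st).1.length = st.1.length ∧
    (pvPassA s 0 m st).2.length = st.2.length ∧
    (pvPassA s 0 m st).1.getD k false
      = (st.1.getD k false || (decide (2*k+1 < m) && decide (pvCharD s ((2*k+1 : Nat) : Int) = '<'))) ∧
    (pvPassA s 0 m st).2.getD k false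
      = (st.2.getD k false || (decide (1 ≤ k) && decide (2*k-1 < m) && decide (pvCharD s ((2*k-1 : Nat) : Int) = '<'))) := by
  induction m with
  | zero => simp [pvPassA]
  | succ m ih =>
    obtain ⟨L1, L2, H1, H2⟩ := ih
    rw [pvPassA_succ, pvStep0_eq]
    by_cases hw : m % 2 = 1 ∧ pvCharD s (m : Int) = '<'
    · obtain ⟨hm, hc⟩ := hw
      rw [if_pos ⟨hm, hc⟩, if_pos ⟨hm, hc⟩]
      refine ⟨by simp [L1], by simp [L2], ?_, ?_⟩
      · rw [pv_getD_set]
        by_cases he : m / 2 = k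
        · rw [if_pos ⟨he, by rw [L1]; exact hka⟩]
          have e : ((2*k+1 : Nat) : Int) = (m : Int) := by omega
          have e2 : 2*k+1 < m+1 := by omega
          rw [e, hc]
          simp [e2]
        · rw [if_neg (fun h => he h.1), H1]
          have e2 : decide (2*k+1 < m+1) = decide (2*k+1 < m) := by
            apply decide_eq_decide.mpr; omega
          rw [e2]
      · rw [pv_getD_set]
        by_cases he : (m+1) / 2 = k
        · rw [if_pos ⟨he, by rw [L2]; exact hkb⟩]
          have e : ((2*k-1 : Nat) : Int) = (m : Int) := by omega
          have e1 : 1 ≤ k := by omega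
          have e2 : 2*k-1 < m+1 := by omega
          rw [e, hc]
          simp [e1, e2]
        · rw [if_neg (fun h => he h.1), H2]
          by_cases h1k : 1 ≤ k
          · have e2 : decide (2*k-1 < m+1) = decide (2*k-1 < m) := by
              apply decide_eq_decide.mpr; omega
            rw [e2]
          · have e0 : k = 0 := by omega
            subst e0
            simp
    · rw [if_neg hw, if_neg hw]
      refine ⟨L1, L2, ?_, ?_⟩
      · rw [H1]
        by_cases hb : 2*k+1 < m+1
        · by_cases hb' : 2*k+1 < m
          · simp [hb, hb']
          · have e : 2*k+1 = m := by omega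
            have hcf : ¬ (pvCharD s ((2*k+1 : Nat) : Int) = '<') := by
              rw [show ((2*k+1 : Nat) : Int) = (m : Int) by omega]
              intro hcc
              exact hw ⟨by omega, hcc⟩
            rw [decide_eq_false hcf]; simp
        · have hb' : ¬ 2*k+1 < m := by omega
          simp [hb, hb']
      · rw [H2]
        by_cases h1k : 1 ≤ k
        · by_cases hb : 2*k-1 < m+1
          · by_cases hb' : 2*k-1 < m
            · simp [hb, hb']
            · have e : 2*k-1 = m := by omega
              have hcf : ¬ (pvCharD s ((2*k-1 : Nat) : Int) = '<') := by
                rw [show ((2*k-1 : Nat) : Int) = (m : Int) by omega]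
                intro hcc
                exact hw ⟨by omega, hcc⟩
              rw [decide_eq_false hcf]; simp
          · have hb' : ¬ 2*k-1 < m := by omega
            simp [hb, hb']
        · have e0 : k = 0 := by omega
          subst e0
          simp

theorem pvPass1 (s : String) (m : Nat) (st : List Bool × List Bool) (k : Nat)
    (hka : k < st.1.length) (hkb : k < st.2.length) :
    (pvPassA s 1 m st).1.length = st.1.length ∧
    (pvPassA s 1 m st).2.length = st.2.length ∧
    (pvPassA s 1 m st).1.getD k false
      = (st.1.getD k false || (decide (2*k < m) && decide (pvCharD s ((2*k : Nat) : Int) = '<'))) ∧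
    (pvPassA s 1 m st).2.getD k false
      = (st.2.getD k false || (decide (2*k < m) && decide (pvCharD s ((2*k : Nat) : Int) = '<'))) := by
  induction m with
  | zero => simp [pvPassA]
  | succ m ih =>
    obtain ⟨L1, L2, H1, H2⟩ := ih
    rw [pvPassA_succ, pvStep1_eq]
    by_cases hw : m % 2 = 0 ∧ pvCharD s (m : Int) = '<'
    · obtain ⟨hm, hc⟩ := hw
      rw [if_pos ⟨hm, hc⟩, if_pos ⟨hm, hc⟩]
      refine ⟨by simp [L1], by simp [L2], ?_, ?_⟩
      · rw [pv_getD_set]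
        by_cases he : m / 2 = k
        · rw [if_pos ⟨he, by rw [L1]; exact hka⟩]
          rw [show ((2*k : Nat) : Int) = (m : Int) by omega, hc]
          simp [show 2*k < m+1 by omega]
        · rw [if_neg (fun h => he h.1), H1]
          rw [show decide (2*k < m+1) = decide (2*k < m) from decide_eq_decide.mpr (by omega)]
      · rw [pv_getD_set]
        by_cases he : m / 2 = k
        · rw [if_pos ⟨he, by rw [L2]; exact hkb⟩]
          rw [show ((2*k : Nat) : Int) = (m : Int) by omega, hc]
          simp [show 2*k < m+1 by omega]
        · rw [if_neg (fun h => he h.1), H2]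
          rw [show decide (2*k < m+1) = decide (2*k < m) from decide_eq_decide.mpr (by omega)]
    · rw [if_neg hw, if_neg hw]
      refine ⟨L1, L2, ?_, ?_⟩
      · rw [H1]
        by_cases hb : 2*k < m+1
        · by_cases hb' : 2*k < m
          · simp [hb, hb']
          · have hcf : ¬ (pvCharD s ((2*k : Nat) : Int) = '<') := by
              rw [show ((2*k : Nat) : Int) = (m : Int) by omega]
              intro hcc
              exact hw ⟨by omega, hcc⟩
            rw [decide_eq_false hcf]; simp
        · have hb' : ¬ 2*k < m := by omega
          simp [hb, hb']
      · rw [H2]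
        by_cases hb : 2*k < m+1
        · by_cases hb' : 2*k < m
          · simp [hb, hb']
          · have hcf : ¬ (pvCharD s ((2*k : Nat) : Int) = '<') := by
              rw [show ((2*k : Nat) : Int) = (m : Int) by omega]
              intro hcc
              exact hw ⟨by omega, hcc⟩
            rw [decide_eq_false hcf]; simp
        · have hb' : ¬ 2*k < m := by omega
          simp [hb, hb']


theorem pvScanB_eq_any (r0 r1 : String) (l : List Int) :
    pvScanB r0 r1 l =
      if l.any (fun k =>
          (decide (pvCharD r0 (2*k+1) = '<') || decide (pvCharD r1 (2*k) = '<')) &&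
          ((decide (0 ≤ 2*k-1) && decide (pvCharD r0 (2*k-1) = '<')) || decide (pvCharD r1 (2*k) = '<')))
      then "NO" else "YES" := by
  induction l with
  | nil => simp [pvScanB]
  | cons k ks ih =>
      simp only [pvScanB, List.any_cons, ih]
      by_cases h : ((decide (pvCharD r0 (2*k+1) = '<') || decide (pvCharD r1 (2*k) = '<')) &&
          ((decide (0 ≤ 2*k-1) && decide (pvCharD r0 (2*k-1) = '<')) || decide (pvCharD r1 (2*k) = '<'))) = true
      · simp only [h, Bool.true_or, if_true]
      · rw [Bool.not_eq_true] at h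
        simp only [h, Bool.false_or, Bool.false_eq_true, if_false]

theorem pv_any_congr {α : Type} (l : List α) (f g : α → Bool) (h : ∀ x ∈ l, f x = g x) :
    l.any f = l.any g := by
  induction l with
  | nil => rfl
  | cons x xs ih =>
      simp only [List.any_cons, h x (List.mem_cons_self), ih (fun y hy => h y (List.mem_cons_of_mem _ hy))]

theorem pv_fold_eq_pass (s : String) (i : Int) (n : Int) (st : List Bool × List Bool) :
    (PySem.List.pyRange 0 n 1).foldl (pvStepA s i) st = pvPassA s i n.toNat st := by
  rw [PySem.List.pyRange_one, List.foldl_map]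
  simp only [zero_add, sub_zero]
  rfl

theorem pv_ports_agree (n : Int) (rows : List String) :
    can_reach_destination n rows = can_reach_destination_alt n rows := by
  unfold can_reach_destination can_reach_destination_alt
  rw [show PySem.List.pyRange 0 2 1 = [0, 1] from by decide]
  simp only [List.foldl_cons, List.foldl_nil, pv_fold_eq_pass, pvScanB_eq_any]
  have hfd : PySem.Int.floordiv n 2 = n / 2 := by
    simp [PySem.Int.floordiv, Int.fdiv_eq_ediv]
  set r0 := PySem.List.pyGetD rows 0 "" with hr0
  set r1 := PySem.List.pyGetD rows 1 "" with hr1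
  set R := List.replicate (PySem.Int.floordiv n 2).toNat false with hR
  have hany :
      (PySem.List.pyRange 0 (PySem.Int.floordiv n 2) 1).any (fun k =>
          PySem.List.pyGetD (pvPassA r1 1 n.toNat (pvPassA r0 0 n.toNat (R, R))).1 k false &&
          PySem.List.pyGetD (pvPassA r1 1 n.toNat (pvPassA r0 0 n.toNat (R, R))).2 k false)
      = (PySem.List.pyRange 0 (PySem.Int.floordiv n 2) 1).any (fun k =>
          (decide (pvCharD r0 (2*k+1) = '<') || decide (pvCharD r1 (2*k) = '<')) &&
          ((decide (0 ≤ 2*k-1) && decide (pvCharD r0 (2*k-1) = '<')) || decide (pvCharD r1 (2*k) = '<'))) := by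
    apply pv_any_congr
    intro x hx
    rw [PySem.List.mem_pyRange_one] at hx
    obtain ⟨hx0, hxh⟩ := hx
    obtain ⟨k, hx'⟩ : ∃ k : Nat, x = (k : Int) := ⟨x.toNat, by omega⟩
    subst hx'
    have hkh : k < (PySem.Int.floordiv n 2).toNat := by
      rw [hfd] at hxh ⊢; omega
    have hRlen : k < R.length := by simpa [hR] using hkh
    have hm1 : 2*k+1 < n.toNat := by
      rw [hfd] at hxh; omega
    have hm0 : 2*k < n.toNat := by omega
    obtain ⟨L1, L2, H1, H2⟩ := pvPass0 r0 n.toNat (R, R) k hRlen hRlen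
    obtain ⟨M1, M2, G1, G2⟩ :=
      pvPass1 r1 n.toNat (pvPassA r0 0 n.toNat (R, R)) k (by rw [L1]; exact hRlen) (by rw [L2]; exact hRlen)
    rw [PySem.List.pyGetD_natCast, PySem.List.pyGetD_natCast]
    rw [G1, G2, H1, H2]
    have hRk : R.getD k false = false := by simp [hR]
    rw [hRk]
    rw [decide_eq_true hm1, decide_eq_true hm0]
    have c1 : ((2*k+1 : Nat) : Int) = 2*(k : Int)+1 := by push_cast; ring
    have c0 : ((2*k : Nat) : Int) = 2*(k : Int) := by push_cast; ring
    rw [c1, c0]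
    by_cases h1k : 1 ≤ k
    · have cm : ((2*k-1 : Nat) : Int) = 2*(k : Int)-1 := by omega
      have cg : decide ((0:Int) ≤ 2*(k:Int)-1) = true := by
        apply decide_eq_true; omega
      have cb : decide (2*k-1 < n.toNat) = true := by
        apply decide_eq_true; omega
      rw [decide_eq_true h1k, cm, cb, cg]
      simp only [Bool.true_and, Bool.false_or]
    · have hk0 : k = 0 := by omega
      subst hk0
      have cg : decide ((0:Int) ≤ 2*((0:Nat) : Int)-1) = false := by
        apply decide_eq_false; omega
      rw [cg]
      simp
  rw [hfd] at hany ⊢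
  simp only [hany]

-- ===== VERDICT (by name: the statement is the Claim_ definition above) =====
theorem can_reach_destination_spec : Claim_equal_can_reach_destination := by
  intro n rows _ _
  unfold Spec_can_reach_destination
  exact pv_ports_agree n rows
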